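-- pv_equiv track=rewrite | github.com/CyED3/ChomskyProject | projectChomsky/src/cli.py | _fallback_classify
-- ===== SOURCE A (Python) =====
-- def _fallback_classify(tokens):
--     """
--     Clasificacion heuristica que simula el comportamiento del DFA.
--     Sera reemplazada por classifier.classify() cuando se implemente.
--
--     Logica basica:
--       - Si hay credencial + leak -> Security Violation
--       - Si hay credencial o leak solos -> Needs Review
--       - Si solo hay warnings (IPv4, TODO) -> Needs Review
--       - Si no hay nada peligroso -> Safe
--     """
--     has_cred = any(t in {'HARDCODED_CRED', 'AWS_KEY'} for t in tokens)
--     has_leak = any(t in {'PRINT_LEAK', 'CONSOLE_LEAK'} for t in tokens)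
--     has_warn = any(t in {'IPv4', 'TODO'} for t in tokens)
--
--     if has_cred and has_leak:
--         return 'Security Violation'
--     elif has_cred or has_leak:
--         return 'Needs Review'
--     elif has_warn:
--         return 'Needs Review'
--     return 'Safe'
-- ===== SOURCE B (Python) =====
-- def _fallback_classify(tokens):
--     has_cred = has_leak = has_warn = False
--     for t in tokens:
--         if t in ('HARDCODED_CRED', 'AWS_KEY'):
--             has_cred = True
--         elif t in ('PRINT_LEAK', 'CONSOLE_LEAK'):
--             has_leak = True
--         elif t in ('IPv4', 'TODO'):
--             has_warn = True
--         if has_cred and has_leak: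
--             return 'Security Violation'
--     if has_cred or has_leak:
--         return 'Needs Review'
--     if has_warn:
--         return 'Needs Review'
--     return 'Safe'
-- ===== Notes on version B (the rewrite author's own statement) =====
-- stated objective: alternative
-- what changed: Replaced three independent any()-scans over the token list by a single pass maintaining three flags with an early return as soon as both a credential and a leak token have been seen.
import Mathlib
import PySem

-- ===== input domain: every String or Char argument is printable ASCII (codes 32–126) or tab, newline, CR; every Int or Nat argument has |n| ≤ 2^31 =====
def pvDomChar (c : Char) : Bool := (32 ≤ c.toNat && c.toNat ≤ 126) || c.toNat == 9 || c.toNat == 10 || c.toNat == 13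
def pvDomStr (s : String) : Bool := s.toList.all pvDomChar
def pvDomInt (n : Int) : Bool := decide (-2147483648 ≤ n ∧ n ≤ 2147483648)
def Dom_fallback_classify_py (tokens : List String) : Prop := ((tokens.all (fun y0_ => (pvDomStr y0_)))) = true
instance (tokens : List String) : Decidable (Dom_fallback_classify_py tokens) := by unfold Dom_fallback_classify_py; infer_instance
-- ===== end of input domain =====

-- B replaces A's three independent any-scans by one loop over the tokens maintaining three
-- flags with an early return once both a credential and a leak token have been seen
-- (objective: alternative decomposition, same asymptotic cost).


-- ===== PORT A =====
-- literal transliteration: three any()-scans, then the decision cascade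
def fallback_classify_py (tokens : List String) : String :=
  let has_cred := tokens.any (fun t => t == "HARDCODED_CRED" || t == "AWS_KEY")
  let has_leak := tokens.any (fun t => t == "PRINT_LEAK" || t == "CONSOLE_LEAK")
  let has_warn := tokens.any (fun t => t == "IPv4" || t == "TODO")
  if has_cred && has_leak then "Security Violation"
  else if has_cred || has_leak then "Needs Review"
  else if has_warn then "Needs Review"
  else "Safe"

-- ===== PORT B =====
-- one pass with three flags; early return when cred and leak are both set (Source B's loop)
def fbLoop : List String → Bool → Bool → Bool → String
  | [], c, l, w =>
    if c || l then "Needs Review"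
    else if w then "Needs Review"
    else "Safe"
  | t :: ts, c, l, w =>
    let c' := if t == "HARDCODED_CRED" || t == "AWS_KEY" then true else c
    let l' := if !(t == "HARDCODED_CRED" || t == "AWS_KEY") &&
                 (t == "PRINT_LEAK" || t == "CONSOLE_LEAK") then true else l
    let w' := if !(t == "HARDCODED_CRED" || t == "AWS_KEY") &&
                 !(t == "PRINT_LEAK" || t == "CONSOLE_LEAK") &&
                 (t == "IPv4" || t == "TODO") then true else w
    if c' && l' then "Security Violation"
    else fbLoop ts c' l' w'

def fallback_classify_py_alt (tokens : List String) : String :=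
  fbLoop tokens false false false

-- ===== PRECONDITION & SPEC =====
def Spec_fallback_classify_py (tokens : List String) (out : String) : Prop := out = fallback_classify_py_alt tokens
instance (tokens : List String) (out : String) : Decidable (Spec_fallback_classify_py tokens out) := by unfold Spec_fallback_classify_py; infer_instance

-- ===== CLAIM (what is proved, stated in full; the proofs are below) =====
def Claim_equal_fallback_classify_py : Prop := ∀ (tokens : List String), Dom_fallback_classify_py tokens → Spec_fallback_classify_py tokens (fallback_classify_py tokens)

-- ===== LEMMAS AND PROOFS =====

-- loop invariant: with both flags not yet simultaneously set, the single-pass loop computes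
-- exactly A's cascade over the remaining tokens (with the flags or-ed in)
theorem fbLoop_spec (ts : List String) : ∀ (c l w : Bool), (c && l) = false →
    fbLoop ts c l w =
      (let hc := c || ts.any (fun t => t == "HARDCODED_CRED" || t == "AWS_KEY")
       let hl := l || ts.any (fun t => t == "PRINT_LEAK" || t == "CONSOLE_LEAK")
       let hw := w || ts.any (fun t => t == "IPv4" || t == "TODO")
       if hc && hl then "Security Violation"
       else if hc || hl then "Needs Review"
       else if hw then "Needs Review"
       else "Safe") := by
  induction ts with
  | nil =>
    intro c l w h
    simp [fbLoop]
    cases c <;> cases l <;> simp_all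
  | cons t ts ih =>
    intro c l w h
    by_cases hc : (t == "HARDCODED_CRED" || t == "AWS_KEY") = true
    · have hc' := hc
      simp only [Bool.or_eq_true, beq_iff_eq] at hc'
      have h1 : (t == "PRINT_LEAK" || t == "CONSOLE_LEAK") = false := by
        rcases hc' with h' | h' <;> subst h' <;> decide
      have h2 : (t == "IPv4" || t == "TODO") = false := by
        rcases hc' with h' | h' <;> subst h' <;> decide
      cases l with
      | true => simp [fbLoop, hc, h1]
      | false => simp [fbLoop, hc, h1, h2, ih true false w (by decide)]
    · by_cases hl : (t == "PRINT_LEAK" || t == "CONSOLE_LEAK") = true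
      · have hl' := hl
        simp only [Bool.or_eq_true, beq_iff_eq] at hl'
        have h2 : (t == "IPv4" || t == "TODO") = false := by
          rcases hl' with h' | h' <;> subst h' <;> decide
        cases c with
        | true => simp [fbLoop, hc, hl]
        | false => simp [fbLoop, hc, hl, h2, ih false true w (by decide)]
      · by_cases hw : (t == "IPv4" || t == "TODO") = true
        · simp [fbLoop, hc, hl, hw, ih c l true h, h]
        · simp [fbLoop, hc, hl, hw, ih c l w h, h]

-- ===== VERDICT (by name: the statement is the Claim_ definition above) =====
theorem fallback_classify_py_spec : Claim_equal_fallback_classify_py := by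
  intro tokens _
  unfold Spec_fallback_classify_py fallback_classify_py fallback_classify_py_alt
  rw [fbLoop_spec tokens false false false (by decide)]
  simp
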